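-- pv_equiv track=rewrite | github.com/jinucho/python_practice | 프로그래머스/1/131128. 숫자 짝꿍/숫자 짝꿍.py | solution
-- ===== SOURCE A (Python) =====
-- from collections import Counter
--
-- def solution(X, Y):
--     count_X = Counter(X)
--     count_Y = Counter(Y)
--     common_elements = count_X & count_Y
--     if not common_elements:
--         return "-1"
--     answer = ''.join([key*common_elements[key] for key in sorted(list(common_elements.keys()),reverse=True)])
--
--     if answer == "0"*len(answer):
--         return "0"
--     return answer
-- ===== SOURCE B (Python) =====
-- def solution(X, Y):
--     xs = sorted(X, reverse=True)
--     ys = sorted(Y, reverse=True)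
--     res = []
--     i = j = 0
--     while i < len(xs) and j < len(ys):
--         if xs[i] == ys[j]:
--             res.append(xs[i])
--             i += 1
--             j += 1
--         elif xs[i] > ys[j]:
--             i += 1
--         else:
--             j += 1
--     if not res:
--         return "-1"
--     if res[0] == '0' and res[-1] == '0':
--         return "0"
--     return ''.join(res)
-- ===== Notes on version B (the rewrite author's own statement) =====
-- stated objective: alternative
-- what changed: Replaces A's Counter-building, Counter intersection and sort of the distinct intersection keys by sorting both whole strings in descending order and extracting the common multiset with a single two-pointer merge; the empty and all-zero checks become a head/last-element test on the descending result.
import Mathlib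
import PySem

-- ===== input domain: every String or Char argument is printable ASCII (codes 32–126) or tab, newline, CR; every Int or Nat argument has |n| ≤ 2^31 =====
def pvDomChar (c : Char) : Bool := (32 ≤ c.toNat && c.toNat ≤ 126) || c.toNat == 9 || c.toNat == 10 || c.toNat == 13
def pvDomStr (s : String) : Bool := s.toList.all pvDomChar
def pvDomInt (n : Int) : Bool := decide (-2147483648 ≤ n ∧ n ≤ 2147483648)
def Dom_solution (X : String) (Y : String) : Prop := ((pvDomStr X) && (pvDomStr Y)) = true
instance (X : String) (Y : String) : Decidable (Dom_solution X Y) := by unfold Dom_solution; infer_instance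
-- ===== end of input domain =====

-- B replaces A's Counter/intersection/sort-of-keys pipeline by sorting both strings
-- descending and extracting the common multiset with a two-pointer merge (objective: alternative).

-- ===== PORT A =====
-- Counter & Counter is ported by hand, exactly per CPython's Counter.__and__:
-- iterate the left counter's items in order, keep min(count, other[k]) when positive.
def solution (X : String) (Y : String) : String :=
  let countX := PySem.Dict.counter X.toList
  let countY := PySem.Dict.counter Y.toList
  let common := countX.items.foldl (fun d kv =>
      if 0 < min kv.2 (countY.getD kv.1 0) then d.insert kv.1 (min kv.2 (countY.getD kv.1 0))
      else d) PySem.Dict.empty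
  if common.items = [] then "-1"
  else
    let answer := PySem.Chars.join []
      ((PySem.List.sorted common.keys (fun k => k) true).map
        (fun key => PySem.List.pyRepeat [key] (common.getD key 0)))
    if answer = PySem.List.pyRepeat ['0'] ((answer.length : Int)) then "0"
    else String.ofList answer

-- ===== PORT B =====
-- the while loop over indices i, j becomes the obvious structural recursion on the two suffixes
def pvMerge : List Char → List Char → List Char
  | [], _ => []
  | _ :: _, [] => []
  | a :: as, b :: bs =>
      if a = b then a :: pvMerge as bs
      else if b < a then pvMerge as (b :: bs)
      else pvMerge (a :: as) bs

def solution_alt (X : String) (Y : String) : String :=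
  let xs := PySem.List.sorted X.toList (fun c => c) true
  let ys := PySem.List.sorted Y.toList (fun c => c) true
  let res := pvMerge xs ys
  if res = [] then "-1"
  else if PySem.List.pyGet? res 0 = some '0' ∧ PySem.List.pyGet? res (-1) = some '0' then "0"
  else String.ofList res

-- ===== PRECONDITION & SPEC =====
def Spec_solution (X : String) (Y : String) (out : String) : Prop := out = solution_alt X Y
instance (X : String) (Y : String) (out : String) : Decidable (Spec_solution X Y out) := by unfold Spec_solution; infer_instance

-- ===== CLAIM (what is proved, stated in full; the proofs are below) =====
def Claim_equal_solution : Prop := ∀ (X : String) (Y : String), Dom_solution X Y → Spec_solution X Y (solution X Y)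

-- ===== LEMMAS AND PROOFS =====

-- ''.join over a list of chunks is flatten
theorem pv_join_nil (l : List (List Char)) : PySem.Chars.join [] l = l.flatten := by
  simp only [PySem.Chars.join, List.intercalate]
  induction l with
  | nil => rfl
  | cons a t ih =>
    cases t with
    | nil => simp
    | cons b u => simp_all [List.intersperse]

-- the hand-ported Counter-& fold, characterised as a filterMap
theorem pv_items_and (cY : PySem.Dict Char Int) (pairs : List (Char × Int)) (d : PySem.Dict Char Int)
    (hnd : (pairs.map Prod.fst).Nodup) (hdis : ∀ q ∈ pairs, d.contains q.1 = false) :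
    (pairs.foldl (fun d kv =>
      if 0 < min kv.2 (cY.getD kv.1 0) then d.insert kv.1 (min kv.2 (cY.getD kv.1 0)) else d) d).items
      = d.items ++ pairs.filterMap (fun kv =>
          if 0 < min kv.2 (cY.getD kv.1 0) then some (kv.1, min kv.2 (cY.getD kv.1 0)) else none) := by
  induction pairs generalizing d with
  | nil => simp
  | cons q rest ih =>
    simp only [List.map_cons, List.nodup_cons, List.mem_map] at hnd
    simp only [List.foldl_cons, List.filterMap_cons]
    by_cases h : 0 < min q.2 (cY.getD q.1 0)
    · have hdis' : ∀ q' ∈ rest, (d.insert q.1 (min q.2 (cY.getD q.1 0))).contains q'.1 = false := by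
        intro q' hq'
        rw [PySem.Dict.contains_insert]
        have h1 : q'.1 ≠ q.1 := fun he => hnd.1 ⟨q', hq', he⟩
        simp [h1, hdis q' (List.mem_cons_of_mem _ hq')]
      rw [if_pos h, if_pos h, ih _ hnd.2 hdis',
        PySem.Dict.items_insert_of_not_contains _ _ (hdis q (List.mem_cons_self))]
      simp only [List.append_assoc, List.singleton_append]
    · rw [if_neg h, if_neg h, ih _ hnd.2 (fun q' hq' => hdis q' (List.mem_cons_of_mem _ hq'))]

-- merge of two lists is a sublist of the left one
theorem pvMerge_sublist_left (xs ys : List Char) : (pvMerge xs ys).Sublist xs := by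
  induction xs generalizing ys with
  | nil => simp [pvMerge]
  | cons a as ih =>
    induction ys with
    | nil => simp [pvMerge]
    | cons b bs ihb =>
      simp only [pvMerge]
      split_ifs with h1 h2
      · exact (ih bs).cons₂ a
      · exact (ih (b :: bs)).cons a
      · exact ihb

-- counts of the merge of two descending lists: the multiset intersection
theorem pvMerge_count (xs ys : List Char)
    (hx : xs.Pairwise (fun a b => b ≤ a)) (hy : ys.Pairwise (fun a b => b ≤ a)) (c : Char) :
    (pvMerge xs ys).count c = min (xs.count c) (ys.count c) := by
  induction xs generalizing ys with
  | nil => simp [pvMerge]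
  | cons a as ih =>
    induction ys with
    | nil => simp [pvMerge]
    | cons b bs ihb =>
      have hx' := (List.pairwise_cons.mp hx).2
      have hy' := (List.pairwise_cons.mp hy).2
      simp only [pvMerge]
      split_ifs with h1 h2
      · subst h1
        by_cases hc : c = a
        · subst hc
          simp only [List.count_cons_self]
          rw [ih bs hx' hy']
          omega
        · simp only [List.count_cons_of_ne (show a ≠ c from fun he => hc he.symm)]
          exact ih bs hx' hy'
      · -- b < a : a cannot occur in b :: bs
        have hmem : a ∉ b :: bs := by
          intro hmem
          rcases List.mem_cons.mp hmem with h | h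
          · exact h1 h
          · exact absurd ((List.pairwise_cons.mp hy).1 a h) (not_le.mpr h2)
        rw [ih (b :: bs) hx' hy]
        by_cases hc : c = a
        · subst hc
          rw [List.count_eq_zero.mpr hmem]
          simp
        · simp only [List.count_cons_of_ne (show a ≠ c from fun he => hc he.symm)]
      · -- a < b : b cannot occur in a :: as
        have hab : a < b := lt_of_le_of_ne (not_lt.mp h2) h1
        have hmem : b ∉ a :: as := by
          intro hmem
          rcases List.mem_cons.mp hmem with h | h
          · exact h1 h.symm
          · exact absurd ((List.pairwise_cons.mp hx).1 b h) (not_le.mpr hab)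
        rw [ihb hy']
        by_cases hc : c = b
        · subst hc
          rw [List.count_eq_zero.mpr hmem]
          simp
        · simp only [List.count_cons_of_ne (show b ≠ c from fun he => hc he.symm)]

-- filtered chunks that are empty may be dropped from a flatten
theorem pv_flatten_filter (f : Char → List Char) (p : Char → Bool) (l : List Char)
    (h : ∀ c ∈ l, p c = false → f c = []) :
    ((l.filter p).map f).flatten = (l.map f).flatten := by
  induction l with
  | nil => rfl
  | cons a t ih =>
    have ih' := ih (fun c hc => h c (List.mem_cons_of_mem _ hc))
    by_cases ha : p a
    · simp only [List.filter_cons, ha, if_pos, List.map_cons, List.flatten_cons, ih']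
    · have ha' : p a = false := Bool.eq_false_iff.mpr ha
      simp only [List.filter_cons, ha', Bool.false_eq_true, if_false, List.map_cons,
        List.flatten_cons, h a List.mem_cons_self ha', List.nil_append, ih']

-- sorting a filtered nodup list = filtering the sorted list
theorem pv_sorted_filter (S : List Char) (hS : S.Nodup) (p : Char → Bool) :
    PySem.List.sorted (S.filter p) (fun k => k) true
      = (PySem.List.sorted S (fun k => k) true).filter p := by
  apply PySem.List.sorted_rev_eq_of_perm_of_pairwise_gt
  · exact (PySem.List.sorted_perm S _ true).filter p
  · have hle := PySem.List.sorted_pairwise_rev S (fun k => k)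
    have hnd : (PySem.List.sorted S (fun k => k) true).Nodup :=
      (PySem.List.sorted_perm S _ true).nodup_iff.mpr hS
    have hgt : (PySem.List.sorted S (fun k => k) true).Pairwise (fun a b => b < a) := by
      refine (hle.and hnd).imp ?_
      rintro a b ⟨h1, h2⟩
      exact lt_of_le_of_ne h1 (fun he => h2 he.symm)
    exact hgt.filter p

-- a 0/ite-sum over a nodup list collapses to a membership test
theorem pv_sum_ite (f : Char → Nat) (L : List Char) (hnd : L.Nodup) (c : Char) :
    (L.map (fun k => if k = c then f k else 0)).sum = if c ∈ L then f c else 0 := by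
  induction L with
  | nil => simp
  | cons a t ih =>
    simp only [List.nodup_cons] at hnd
    simp only [List.map_cons, List.sum_cons, ih hnd.2, List.mem_cons]
    by_cases hac : a = c
    · subst hac
      simp [hnd.1]
    · simp only [show (c = a ∨ c ∈ t) ↔ c ∈ t from or_iff_right (fun h => hac h.symm),
        if_neg hac]
      omega

-- in a descending nonempty list, head = last = '0' says every element is '0'
theorem pv_head_last (l : List Char) (h : l ≠ []) (hs : l.Pairwise (fun a b => b ≤ a)) :
    (PySem.List.pyGet? l 0 = some '0' ∧ PySem.List.pyGet? l (-1) = some '0') ↔ ∀ b ∈ l, b = '0' := by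
  have hlen : 0 < l.length := List.length_pos_iff.mpr h
  rw [PySem.List.pyGet?_zero, PySem.List.pyGet?_neg_one, List.getLast?_eq_some_getLast h,
    List.getLast_eq_getElem h, List.getElem?_eq_getElem hlen]
  have hP := List.pairwise_iff_getElem.mp hs
  constructor
  · rintro ⟨h0, hl⟩ b hb
    obtain ⟨k, hk, rfl⟩ := List.mem_iff_getElem.mp hb
    have h1 : l[k] ≤ l[0] := by
      rcases Nat.eq_zero_or_pos k with hz | hz
      · subst hz; exact le_refl _
      · exact hP 0 k hlen hk hz
    have h2 : l[l.length - 1] ≤ l[k] := by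
      rcases eq_or_lt_of_le (Nat.le_sub_one_of_lt hk) with hz | hz
      · subst hz; exact le_refl _
      · exact hP k (l.length - 1) hk (by omega) hz
    have e0 : l[0] = '0' := Option.some.inj h0
    have el : l[l.length - 1] = '0' := Option.some.inj hl
    rw [e0] at h1
    rw [el] at h2
    exact le_antisymm h1 h2
  · intro hall
    exact ⟨congrArg some (hall _ (l.getElem_mem hlen)),
      congrArg some (hall _ (l.getElem_mem (by omega)))⟩

theorem solution_eq (X Y : String) : solution X Y = solution_alt X Y := by
  simp only [solution, solution_alt]
  set xs := X.toList with hxs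
  set ys := Y.toList with hys
  set S := PySem.Set.ofList xs with hS
  have hSnd : S.Nodup := PySem.Set.nodup_ofList xs
  set mI : Char → Int := fun k => min ((xs.count k : Int)) ((ys.count k : Int)) with hmI
  set p : Char → Bool := fun k => decide (0 < mI k) with hp
  set common := (PySem.Dict.counter xs).items.foldl (fun d kv =>
      if 0 < min kv.2 ((PySem.Dict.counter ys).getD kv.1 0) then
        d.insert kv.1 (min kv.2 ((PySem.Dict.counter ys).getD kv.1 0))
      else d) PySem.Dict.empty with hcommon
  -- characterise common
  have hitems : common.items = S.filterMap (fun k => if 0 < mI k then some (k, mI k) else none) := by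
    rw [hcommon, pv_items_and]
    · rw [PySem.Dict.items_counter, List.filterMap_map]
      simp only [PySem.Dict.empty, List.nil_append]
      apply List.filterMap_congr
      intro k hk
      simp [PySem.Dict.getD_counter, hmI]
    · rw [PySem.Dict.items_counter, List.map_map]
      simp only [Function.comp_def]
      exact hSnd.map (fun a b h => h)
    · intro q hq; simp [PySem.Dict.contains_empty]
  have hkeys : common.keys = S.filter p := by
    show common.items.map Prod.fst = S.filter p
    rw [hitems]
    induction S with
    | nil => rfl
    | cons a t ih =>
      simp only [List.filterMap_cons, List.filter_cons]
      by_cases h : 0 < mI a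
      · simp [h, ih, hp]
      · simp [h, ih, hp]
  have hknd : common.keys.Nodup := hkeys ▸ hSnd.filter p
  have hgetD : ∀ k ∈ S, 0 < mI k → common.getD k 0 = mI k := by
    intro k hk h
    refine PySem.Dict.getD_of_mem_items common ?_ hknd 0
    rw [hitems]
    exact List.mem_filterMap.mpr ⟨k, hk, by simp [h]⟩
  set g : Char → List Char := fun c => List.replicate (min (xs.count c) (ys.count c)) c with hg
  have hrep0 : ∀ c, ¬ 0 < mI c → g c = [] := by
    intro c h
    have : min (xs.count c) (ys.count c) = 0 := by
      simp only [hmI, lt_min_iff, not_and_or] at h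
      omega
    simp [hg, this]
  have hans : PySem.Chars.join []
      ((PySem.List.sorted common.keys (fun k => k) true).map
        (fun key => PySem.List.pyRepeat [key] (common.getD key 0)))
      = ((PySem.List.sorted S (fun c => c) true).map g).flatten := by
    rw [pv_join_nil, hkeys, pv_sorted_filter S hSnd p]
    have hmap : ((PySem.List.sorted S (fun c => c) true).filter p).map
        (fun key => PySem.List.pyRepeat [key] (common.getD key 0))
        = ((PySem.List.sorted S (fun c => c) true).filter p).map g := by
      apply List.map_congr_left
      intro k hk
      have hkS : k ∈ S := (PySem.List.mem_sorted S _ true k).mp (List.mem_of_mem_filter hk)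
      have hpk : 0 < mI k := by
        have := List.of_mem_filter hk
        simpa [hp] using this
      rw [PySem.List.pyRepeat_singleton, hgetD k hkS hpk, hg]
      congr 1
      simp only [hmI]
      omega
    rw [hmap]
    exact pv_flatten_filter g p _ (fun c _ hpc => hrep0 c (by simpa [hp] using hpc))
  have hempty : common.items = [] ↔ ((PySem.List.sorted S (fun c => c) true).map g).flatten = [] := by
    rw [hitems, List.filterMap_eq_nil_iff, List.flatten_eq_nil_iff]
    constructor
    · intro h l hl
      obtain ⟨c, hc, rfl⟩ := List.mem_map.mp hl
      have hcS : c ∈ S := (PySem.List.mem_sorted S _ true c).mp hc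
      have := h c hcS
      by_cases hm : 0 < mI c
      · simp [hm] at this
      · exact hrep0 c hm
    · intro h c hc
      have hcs : c ∈ PySem.List.sorted S (fun c => c) true := (PySem.List.mem_sorted S _ true c).mpr hc
      have := h (g c) (List.mem_map.mpr ⟨c, hcs, rfl⟩)
      have hmin : min (xs.count c) (ys.count c) = 0 := by
        simpa [hg, List.replicate_eq_nil_iff] using this
      have : ¬ 0 < mI c := by
        simp only [hmI, lt_min_iff, not_and_or]
        omega
      simp [this]
  set ans := ((PySem.List.sorted S (fun c => c) true).map g).flatten with hansdef
  -- the strictly descending distinct keys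
  have hkeysS : (PySem.List.sorted S (fun c => c) true).Pairwise (fun a b => b < a) := by
    have hle := PySem.List.sorted_pairwise_rev S (fun k => k)
    have hnd : (PySem.List.sorted S (fun k => k) true).Nodup :=
      (PySem.List.sorted_perm S _ true).nodup_iff.mpr hSnd
    refine (hle.and hnd).imp ?_
    rintro a b ⟨h1, h2⟩
    exact lt_of_le_of_ne h1 (fun he => h2 he.symm)
  -- the A-side answer is descending
  have hanssorted : ans.Pairwise (fun a b => b ≤ a) := by
    rw [hansdef, List.pairwise_flatten]
    constructor
    · intro l' hl'
      obtain ⟨c, _, rfl⟩ := List.mem_map.mp hl'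
      exact List.pairwise_replicate.mpr (Or.inr (le_refl c))
    · refine List.pairwise_map.mpr (hkeysS.imp ?_)
      intro a b hab x hx y hy
      rw [List.eq_of_mem_replicate hx, List.eq_of_mem_replicate hy]
      exact le_of_lt hab
  -- the A-side answer has the intersection counts
  have hanscount : ∀ c, ans.count c = min (xs.count c) (ys.count c) := by
    intro c
    rw [hansdef, List.count_flatten, List.map_map]
    have he : ((PySem.List.sorted S (fun c => c) true).map (List.count c ∘ g))
        = (PySem.List.sorted S (fun c => c) true).map
            (fun k => if k = c then min (xs.count k) (ys.count k) else 0) := by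
      apply List.map_congr_left
      intro k _
      by_cases hkc : k = c
      · subst hkc; simp [hg]
      · simp [hg, List.count_replicate, hkc]
    rw [he, pv_sum_ite _ _ ((PySem.List.sorted_perm S _ true).nodup_iff.mpr hSnd) c]
    by_cases hcm : c ∈ xs
    · rw [if_pos ((PySem.List.mem_sorted S _ true c).mpr ((PySem.Set.mem_ofList xs c).mpr hcm))]
    · have h0 : xs.count c = 0 := List.count_eq_zero.mpr hcm
      rw [if_neg (fun hmem => hcm ((PySem.Set.mem_ofList xs c).mp
        ((PySem.List.mem_sorted S _ true c).mp hmem)))]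
      omega
  -- the two-pointer merge of the descending sorts equals the A-side answer
  have hxsort : (PySem.List.sorted xs (fun c => c) true).Pairwise (fun a b => b ≤ a) :=
    PySem.List.sorted_pairwise_rev xs (fun k => k)
  have hysort : (PySem.List.sorted ys (fun c => c) true).Pairwise (fun a b => b ≤ a) :=
    PySem.List.sorted_pairwise_rev ys (fun k => k)
  have hmergeeq : pvMerge (PySem.List.sorted xs (fun c => c) true)
      (PySem.List.sorted ys (fun c => c) true) = ans := by
    have hsortm : (pvMerge (PySem.List.sorted xs (fun c => c) true)
        (PySem.List.sorted ys (fun c => c) true)).Pairwise (fun a b => b ≤ a) :=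
      hxsort.sublist (pvMerge_sublist_left _ _)
    have hperm : (pvMerge (PySem.List.sorted xs (fun c => c) true)
        (PySem.List.sorted ys (fun c => c) true)).Perm ans := by
      refine List.perm_iff_count.mpr (fun c => ?_)
      rw [pvMerge_count _ _ hxsort hysort c, hanscount c,
        (PySem.List.sorted_perm xs _ true).count_eq, (PySem.List.sorted_perm ys _ true).count_eq]
    exact hperm.eq_of_pairwise (fun a b _ _ h1 h2 => le_antisymm h2 h1) hsortm hanssorted
  rw [hmergeeq, hans]
  by_cases hc : common.items = []
  · rw [if_pos hc, if_pos (hempty.mp hc)]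
  · have hne : ans ≠ [] := fun h => hc (hempty.mpr h)
    rw [if_neg hc, if_neg hne]
    have hcond : (ans = PySem.List.pyRepeat ['0'] ((ans.length : Int)))
        ↔ (PySem.List.pyGet? ans 0 = some '0' ∧ PySem.List.pyGet? ans (-1) = some '0') := by
      rw [PySem.List.pyRepeat_singleton, Int.toNat_natCast, pv_head_last ans hne hanssorted]
      constructor
      · intro h b hb
        exact List.eq_replicate_length.mp h b hb
      · intro h
        exact List.eq_replicate_length.mpr h
    by_cases hz : ans = PySem.List.pyRepeat ['0'] ((ans.length : Int))
    · rw [if_pos hz, if_pos (hcond.mp hz)]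
    · rw [if_neg hz, if_neg (fun h => hz (hcond.mpr h))]

-- ===== VERDICT (by name: the statement is the Claim_ definition above) =====
theorem solution_spec : Claim_equal_solution := by
  intro X Y _
  unfold Spec_solution
  exact solution_eq X Y
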